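-- pv_equiv track=rewrite | github.com/PAC-Bench/PAC-Bench | scenario_simulator/utils/result_writer.py | _format_token_usage
-- ===== SOURCE A (Python) =====
-- from typing import Any, Dict, List
--
-- def _format_token_usage(token_usage_by_agent: Dict[str, Dict[str, int]]) -> Dict[str, Dict[str, int]]:
--     totals = {
--         "input_tokens": 0,
--         "output_tokens": 0,
--         "total_tokens": 0,
--     }
--
--     formatted: Dict[str, Dict[str, int]] = {}
--     for agent_name, usage in token_usage_by_agent.items():
--         formatted[agent_name] = {
--             "input_tokens": usage.get("input_tokens", 0),
--             "output_tokens": usage.get("output_tokens", 0),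
--             "total_tokens": usage.get("total_tokens", 0),
--         }
--         totals["input_tokens"] += formatted[agent_name]["input_tokens"]
--         totals["output_tokens"] += formatted[agent_name]["output_tokens"]
--         totals["total_tokens"] += formatted[agent_name]["total_tokens"]
--
--     formatted["total"] = totals
--     return formatted
-- ===== SOURCE B (Python) =====
-- def _format_token_usage(token_usage_by_agent):
--     keys = ("input_tokens", "output_tokens", "total_tokens")
--     # column-wise: one list per field, traversing the agents once per field
--     columns = [[usage.get(k, 0) for usage in token_usage_by_agent.values()] for k in keys]
--     # rows are the transpose of the columns, zipped back with the agent names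
--     formatted = {
--         name: dict(zip(keys, row))
--         for name, row in zip(token_usage_by_agent, zip(*columns))
--     }
--     formatted["total"] = dict(zip(keys, map(sum, columns)))
--     return formatted
-- ===== Notes on version B (the rewrite author's own statement) =====
-- stated objective: alternative
-- what changed: Replaced A's single row-wise loop that builds each agent's entry while accumulating a mutable totals dict with a column-wise (transposed) computation: one column list per token field, the per-agent rows recovered as the transpose zipped with the agent names, and the totals as plain column sums; Pre_ only excludes association lists with duplicate agent keys, which do not represent any Python dict (the function's actual argument is a dict).
import Mathlib
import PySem

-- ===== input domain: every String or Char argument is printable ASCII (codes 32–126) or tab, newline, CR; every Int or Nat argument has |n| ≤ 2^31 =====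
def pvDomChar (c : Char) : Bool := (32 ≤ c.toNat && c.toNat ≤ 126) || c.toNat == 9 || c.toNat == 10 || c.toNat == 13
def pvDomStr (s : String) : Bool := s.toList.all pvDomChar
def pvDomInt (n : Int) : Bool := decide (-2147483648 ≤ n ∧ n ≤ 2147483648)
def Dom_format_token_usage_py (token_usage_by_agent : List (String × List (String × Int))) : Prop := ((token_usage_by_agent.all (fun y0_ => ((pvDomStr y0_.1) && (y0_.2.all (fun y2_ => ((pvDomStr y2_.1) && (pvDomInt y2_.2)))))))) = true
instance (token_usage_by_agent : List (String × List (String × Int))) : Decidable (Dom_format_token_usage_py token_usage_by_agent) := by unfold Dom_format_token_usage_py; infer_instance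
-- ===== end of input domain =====

-- B is a transpose/column-wise implementation: it builds one list per token field over all agents,
-- takes the per-agent rows as the transpose zipped with the names, and the totals as column sums,
-- instead of A's row-wise accumulate-while-building loop; objective: alternative.


-- ===== PORT A =====
def format_token_usage_py (token_usage_by_agent : List (String × List (String × Int))) : List (String × List (String × Int)) :=
  let totals0 : PySem.Dict String Int :=
    PySem.Dict.ofList [("input_tokens", 0), ("output_tokens", 0), ("total_tokens", 0)]
  let st := token_usage_by_agent.foldl
    (fun (st : PySem.Dict String Int × PySem.Dict String (PySem.Dict String Int)) p =>
      let usage := PySem.Dict.ofList p.2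
      let formatted := st.2.insert p.1
        (PySem.Dict.ofList
          [("input_tokens", usage.getD "input_tokens" 0),
           ("output_tokens", usage.getD "output_tokens" 0),
           ("total_tokens", usage.getD "total_tokens" 0)])
      -- formatted[agent_name][key]: the key was just inserted, so get? is always some
      let fa := (formatted.get? p.1).getD PySem.Dict.empty
      let totals := ((st.1.modify "input_tokens" 0 (· + fa.getD "input_tokens" 0)).modify
          "output_tokens" 0 (· + fa.getD "output_tokens" 0)).modify
          "total_tokens" 0 (· + fa.getD "total_tokens" 0)
      (totals, formatted))
    (totals0, PySem.Dict.empty)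
  ((st.2.insert "total" st.1).items).map (fun p => (p.1, p.2.items))

-- ===== PORT B =====
def format_token_usage_py_alt (token_usage_by_agent : List (String × List (String × Int))) : List (String × List (String × Int)) :=
  -- columns = [[usage.get(k, 0) for usage in ….values()] for k in keys]  (three literal keys)
  let col0 := token_usage_by_agent.map (fun p => (PySem.Dict.ofList p.2).getD "input_tokens" 0)
  let col1 := token_usage_by_agent.map (fun p => (PySem.Dict.ofList p.2).getD "output_tokens" 0)
  let col2 := token_usage_by_agent.map (fun p => (PySem.Dict.ofList p.2).getD "total_tokens" 0)
  -- zip(token_usage_by_agent, zip(*columns)); dict(zip(keys, row)) spelled with the three keys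
  let rows := col0.zip (col1.zip col2)
  let formatted : PySem.Dict String (PySem.Dict String Int) :=
    PySem.Dict.ofList (((token_usage_by_agent.map Prod.fst).zip rows).map
      (fun q => (q.1, PySem.Dict.ofList
        [("input_tokens", q.2.1), ("output_tokens", q.2.2.1), ("total_tokens", q.2.2.2)])))
  -- formatted["total"] = dict(zip(keys, map(sum, columns)))
  ((formatted.insert "total"
      (PySem.Dict.ofList
        [("input_tokens", col0.sum), ("output_tokens", col1.sum), ("total_tokens", col2.sum)])).items).map
    (fun p => (p.1, p.2.items))

-- ===== PRECONDITION & SPEC =====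
-- Pre_ excludes association lists with duplicate agent keys: those do not represent any Python
-- dict (the actual argument type), so A never receives them.
def Pre_format_token_usage_py (token_usage_by_agent : List (String × List (String × Int))) : Prop :=
  (token_usage_by_agent.map Prod.fst).Nodup
instance (token_usage_by_agent : List (String × List (String × Int))) : Decidable (Pre_format_token_usage_py token_usage_by_agent) := by unfold Pre_format_token_usage_py; infer_instance
def pvWitness_format_token_usage_py : (List (String × List (String × Int))) :=
  [("a", [("input_tokens", 3), ("output_tokens", 4)]), ("b", [("total_tokens", 7), ("x", 1)])]
def Spec_format_token_usage_py (token_usage_by_agent : List (String × List (String × Int))) (out : List (String × List (String × Int))) : Prop := out = format_token_usage_py_alt token_usage_by_agent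
instance (token_usage_by_agent : List (String × List (String × Int))) (out : List (String × List (String × Int))) : Decidable (Spec_format_token_usage_py token_usage_by_agent out) := by unfold Spec_format_token_usage_py; infer_instance

-- ===== CLAIM (what is proved, stated in full; the proofs are below) =====
def Claim_equal_format_token_usage_py : Prop := ∀ (token_usage_by_agent : List (String × List (String × Int))), Dom_format_token_usage_py token_usage_by_agent → Pre_format_token_usage_py token_usage_by_agent → Spec_format_token_usage_py token_usage_by_agent (format_token_usage_py token_usage_by_agent)

-- ===== LEMMAS AND PROOFS =====

-- the per-agent entry both programs end up with
def pvEntry (p : String × List (String × Int)) : PySem.Dict String Int :=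
  PySem.Dict.ofList
    [("input_tokens", (PySem.Dict.ofList p.2).getD "input_tokens" 0),
     ("output_tokens", (PySem.Dict.ofList p.2).getD "output_tokens" 0),
     ("total_tokens", (PySem.Dict.ofList p.2).getD "total_tokens" 0)]

def pvStepA (st : PySem.Dict String Int × PySem.Dict String (PySem.Dict String Int))
    (p : String × List (String × Int)) :
    PySem.Dict String Int × PySem.Dict String (PySem.Dict String Int) :=
  let formatted := st.2.insert p.1 (pvEntry p)
  let fa := (formatted.get? p.1).getD PySem.Dict.empty
  (((st.1.modify "input_tokens" 0 (· + fa.getD "input_tokens" 0)).modify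
      "output_tokens" 0 (· + fa.getD "output_tokens" 0)).modify
      "total_tokens" 0 (· + fa.getD "total_tokens" 0),
   formatted)

def pvFieldSum (l : List (String × List (String × Int))) (k : String) : Int :=
  (l.map (fun p => (pvEntry p).getD k 0)).sum

lemma pvStepA_eq (st : PySem.Dict String Int × PySem.Dict String (PySem.Dict String Int))
    (p : String × List (String × Int)) :
    pvStepA st p =
      (((st.1.modify "input_tokens" 0 (· + (pvEntry p).getD "input_tokens" 0)).modify
          "output_tokens" 0 (· + (pvEntry p).getD "output_tokens" 0)).modify
          "total_tokens" 0 (· + (pvEntry p).getD "total_tokens" 0),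
       st.2.insert p.1 (pvEntry p)) := by
  unfold pvStepA
  simp only [PySem.Dict.get?_insert_self, Option.getD_some]

-- A's formatted component ignores the totals component
lemma pvFoldA_snd (l : List (String × List (String × Int)))
    (st : PySem.Dict String Int × PySem.Dict String (PySem.Dict String Int)) :
    (l.foldl pvStepA st).2 = l.foldl (fun d p => d.insert p.1 (pvEntry p)) st.2 := by
  induction l generalizing st with
  | nil => rfl
  | cons p l ih => rw [List.foldl_cons, List.foldl_cons, ih, pvStepA_eq]

-- A's totals component: the three running sums
lemma pvFoldA_fst (l : List (String × List (String × Int)))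
    (st : PySem.Dict String Int × PySem.Dict String (PySem.Dict String Int))
    (a b c : Int) (h : st.1 = PySem.Dict.mk [("input_tokens", a), ("output_tokens", b), ("total_tokens", c)]) :
    (l.foldl pvStepA st).1 =
      PySem.Dict.mk [("input_tokens", a + pvFieldSum l "input_tokens"),
                     ("output_tokens", b + pvFieldSum l "output_tokens"),
                     ("total_tokens", c + pvFieldSum l "total_tokens")] := by
  induction l generalizing st a b c with
  | nil => simp [pvFieldSum, h]
  | cons p l ih =>
    rw [List.foldl_cons, pvStepA_eq]
    rw [ih _ (a + (pvEntry p).getD "input_tokens" 0) (b + (pvEntry p).getD "output_tokens" 0)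
          (c + (pvEntry p).getD "total_tokens" 0)]
    · simp [pvFieldSum, List.sum_cons]
      refine ⟨by ring, by ring, by ring⟩
    · rw [h]; rfl

-- B's zipped transpose re-assembles exactly the per-agent entries, in order
lemma pvRows_eq (l : List (String × List (String × Int))) :
    ((l.map Prod.fst).zip
        ((l.map (fun p => (PySem.Dict.ofList p.2).getD "input_tokens" 0)).zip
          ((l.map (fun p => (PySem.Dict.ofList p.2).getD "output_tokens" 0)).zip
            (l.map (fun p => (PySem.Dict.ofList p.2).getD "total_tokens" 0))))).map
      (fun q => (q.1, PySem.Dict.ofList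
        [("input_tokens", q.2.1), ("output_tokens", q.2.2.1), ("total_tokens", q.2.2.2)]))
      = l.map (fun p => (p.1, pvEntry p)) := by
  induction l with
  | nil => rfl
  | cons p l ih =>
    simp only [List.map_cons, List.zip_cons_cons] at *
    rw [ih]
    rfl

-- dict(…) over the row list is the same foldl-insert dict A builds
lemma pvOfList_map (l : List (String × List (String × Int))) :
    PySem.Dict.ofList (l.map (fun p => (p.1, pvEntry p)))
      = l.foldl (fun d p => d.insert p.1 (pvEntry p)) PySem.Dict.empty := by
  show (l.map (fun p => (p.1, pvEntry p))).foldl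
      (fun d q => d.insert q.1 q.2) PySem.Dict.empty = _
  rw [List.foldl_map]

-- each column is the entry field, so a column sum is the field sum
lemma pvCol_eq (l : List (String × List (String × Int))) (k : String)
    (h : ∀ p : String × List (String × Int),
      (PySem.Dict.ofList p.2).getD k 0 = (pvEntry p).getD k 0) :
    l.map (fun p => (PySem.Dict.ofList p.2).getD k 0) = l.map (fun p => (pvEntry p).getD k 0) :=
  List.map_congr_left (fun p _ => h p)

-- ===== VERDICT (by name: the statement is the Claim_ definition above) =====
theorem format_token_usage_py_spec : Claim_equal_format_token_usage_py := by
  intro l _ hpre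
  show format_token_usage_py l = format_token_usage_py_alt l
  unfold format_token_usage_py format_token_usage_py_alt
  simp only []
  have hstep : (fun (st : PySem.Dict String Int × PySem.Dict String (PySem.Dict String Int))
      (p : String × List (String × Int)) =>
      let usage := PySem.Dict.ofList p.2
      let formatted := st.2.insert p.1
        (PySem.Dict.ofList
          [("input_tokens", usage.getD "input_tokens" 0),
           ("output_tokens", usage.getD "output_tokens" 0),
           ("total_tokens", usage.getD "total_tokens" 0)])
      let fa := (formatted.get? p.1).getD PySem.Dict.empty
      (((st.1.modify "input_tokens" 0 (· + fa.getD "input_tokens" 0)).modify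
          "output_tokens" 0 (· + fa.getD "output_tokens" 0)).modify
          "total_tokens" 0 (· + fa.getD "total_tokens" 0),
       formatted)) = pvStepA := rfl
  rw [hstep]
  have hsnd := pvFoldA_snd l
    (PySem.Dict.ofList [("input_tokens", 0), ("output_tokens", 0), ("total_tokens", 0)], PySem.Dict.empty)
  have hfst := pvFoldA_fst l
    (PySem.Dict.ofList [("input_tokens", 0), ("output_tokens", 0), ("total_tokens", 0)], PySem.Dict.empty)
    0 0 0 rfl
  rw [hsnd, hfst]
  rw [pvRows_eq l, pvOfList_map l]
  have h0 : l.map (fun p => (PySem.Dict.ofList p.2).getD "input_tokens" 0)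
      = l.map (fun p => (pvEntry p).getD "input_tokens" 0) := pvCol_eq l _ (fun p => rfl)
  have h1 : l.map (fun p => (PySem.Dict.ofList p.2).getD "output_tokens" 0)
      = l.map (fun p => (pvEntry p).getD "output_tokens" 0) := pvCol_eq l _ (fun p => rfl)
  have h2 : l.map (fun p => (PySem.Dict.ofList p.2).getD "total_tokens" 0)
      = l.map (fun p => (pvEntry p).getD "total_tokens" 0) := pvCol_eq l _ (fun p => rfl)
  rw [h0, h1, h2]
  have htot : (PySem.Dict.ofList
      [("input_tokens", (l.map (fun p => (pvEntry p).getD "input_tokens" 0)).sum),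
       ("output_tokens", (l.map (fun p => (pvEntry p).getD "output_tokens" 0)).sum),
       ("total_tokens", (l.map (fun p => (pvEntry p).getD "total_tokens" 0)).sum)]) =
      PySem.Dict.mk [("input_tokens", 0 + pvFieldSum l "input_tokens"),
                     ("output_tokens", 0 + pvFieldSum l "output_tokens"),
                     ("total_tokens", 0 + pvFieldSum l "total_tokens")] := by
    simp only [zero_add]
    rfl
  rw [htot]
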